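-- pv_equiv track=rewrite | github.com/karthikkumarcholleti/Generative-AI-User-Agent-using-Elasticsearch-and-RAG | FHIR_COMBINED/FHIR_LLM_UA/backend/app/api/condition_categorizer.py | group_conditions_by_category
-- ===== SOURCE A (Python) =====
-- from typing import Dict, Optional, Tuple
--
-- CATEGORY_PRECEDENCE = [
--     "Cardiovascular",
--     "Metabolic",
--     "Respiratory",
--     "Neurological",
--     "Mental Health",
--     "Musculoskeletal",
--     "Gastrointestinal",
--     "Renal",
--     "Endocrine",
--     "Oncology",
--     "Infectious",
--     "Pregnancy",
--     "Therapy",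
--     "Symptoms",
--     "Acute",
--     "Other"
-- ]
--
-- def group_conditions_by_category(conditions: list) -> Dict[str, list]:
--     """
--     Group a list of conditions by category.
--
--     Args:
--         conditions: List of condition dictionaries with category field
--
--     Returns:
--         Dictionary mapping category names to lists of conditions
--     """
--     grouped = {}
--     for condition in conditions:
--         category = condition.get("category", "Other")
--         if category not in grouped:
--             grouped[category] = []
--         grouped[category].append(condition)
--
--     # Sort categories by precedence
--     sorted_categories = sorted(
--         grouped.items(),
--         key=lambda x: (
--             CATEGORY_PRECEDENCE.index(x[0]) if x[0] in CATEGORY_PRECEDENCE else 999,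
--             -len(x[1])  # Secondary sort by count (descending)
--         )
--     )
--
--     return dict(sorted_categories)
-- ===== SOURCE B (Python) =====
-- from typing import Dict
--
-- CATEGORY_PRECEDENCE = [
--     "Cardiovascular",
--     "Metabolic",
--     "Respiratory",
--     "Neurological",
--     "Mental Health",
--     "Musculoskeletal",
--     "Gastrointestinal",
--     "Renal",
--     "Endocrine",
--     "Oncology",
--     "Infectious",
--     "Pregnancy",
--     "Therapy",
--     "Symptoms",
--     "Acute",
--     "Other"
-- ]
--
-- def group_conditions_by_category(conditions: list) -> Dict[str, list]:
--     """Group conditions by category; known categories in precedence order,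
--     unknown ones after them, stably sorted by descending group size."""
--     grouped = {}
--     for condition in conditions:
--         grouped.setdefault(condition.get("category", "Other"), []).append(condition)
--
--     result = {}
--     # Phase 1: categories with a declared precedence, in that fixed order.
--     for name in CATEGORY_PRECEDENCE:
--         if name in grouped:
--             result[name] = grouped[name]
--     # Phase 2: the remaining categories (dict insertion order), stably
--     # sorted by descending count, appended after the known ones.
--     leftovers = [(k, v) for k, v in grouped.items() if k not in CATEGORY_PRECEDENCE]
--     leftovers.sort(key=lambda kv: -len(kv[1]))
--     result.update(leftovers)
--     return result
-- ===== Notes on version B (the rewrite author's own statement) =====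
-- stated objective: alternative
-- what changed: Instead of one keyed sort (precedence index, -count) over all grouped items, B assembles the result in two phases: a scan over the fixed CATEGORY_PRECEDENCE list emits the known categories in precedence order, then only the residual unknown categories are stably sorted by descending group size and appended.
import Mathlib
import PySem

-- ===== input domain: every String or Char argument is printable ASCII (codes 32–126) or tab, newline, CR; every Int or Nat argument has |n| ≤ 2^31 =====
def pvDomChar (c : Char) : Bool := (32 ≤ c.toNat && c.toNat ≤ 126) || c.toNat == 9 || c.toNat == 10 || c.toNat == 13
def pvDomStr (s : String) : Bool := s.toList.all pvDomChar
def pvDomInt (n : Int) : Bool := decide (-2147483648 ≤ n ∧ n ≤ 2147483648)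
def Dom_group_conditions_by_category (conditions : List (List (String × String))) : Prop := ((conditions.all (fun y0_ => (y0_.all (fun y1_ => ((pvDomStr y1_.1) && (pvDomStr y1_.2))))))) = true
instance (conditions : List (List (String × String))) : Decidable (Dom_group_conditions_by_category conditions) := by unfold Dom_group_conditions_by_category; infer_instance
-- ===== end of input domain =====

-- B replaces A's single keyed sort over all grouped items by a two-phase assembly (precedence scan, then a stable
-- sort of only the unknown categories) — objective: alternative decomposition, same observable result.

-- shared module constant (CATEGORY_PRECEDENCE in the Python module)
def CATEGORY_PRECEDENCE : List String :=
  ["Cardiovascular", "Metabolic", "Respiratory", "Neurological", "Mental Health", "Musculoskeletal",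
   "Gastrointestinal", "Renal", "Endocrine", "Oncology", "Infectious", "Pregnancy", "Therapy",
   "Symptoms", "Acute", "Other"]

-- condition.get("category", "Other"): first-match lookup on the association list (exact)
def pvGetCategory (c : List (String × String)) : String :=
  (PySem.Dict.mk c).getD "category" "Other"

-- ===== PORT A =====
def group_conditions_by_category (conditions : List (List (String × String))) : List (String × List (List (String × String))) :=
  let grouped := conditions.foldl
    (fun g c =>
      let category := pvGetCategory c
      let g := if g.contains category then g else g.insert category ([] : List (List (String × String)))
      g.insert category (g.getD category [] ++ [c]))
    PySem.Dict.empty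
  let sorted_categories := PySem.List.sorted2 grouped.items
    (fun x => if CATEGORY_PRECEDENCE.contains x.1 then (((PySem.List.index? CATEGORY_PRECEDENCE x.1).getD 0 : Nat) : Int) else 999)
    (fun x => -(x.2.length : Int))
  -- dict(sorted_categories): keys are distinct, so the items of the resulting dict are exactly this list
  sorted_categories

-- ===== PORT B =====
def group_conditions_by_category_alt (conditions : List (List (String × String))) : List (String × List (List (String × String))) :=
  -- grouped.setdefault(cat, []).append(condition) is exactly Dict.modify cat [] (· ++ [condition])
  let grouped := conditions.foldl
    (fun g c => g.modify (pvGetCategory c) ([] : List (List (String × String))) (fun old => old ++ [c]))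
    PySem.Dict.empty
  -- result dict: every key inserted is fresh, so the dict's items are the appends below (exact)
  let result := CATEGORY_PRECEDENCE.foldl
    (fun r n => if grouped.contains n then r ++ [(n, grouped.getD n ([] : List (List (String × String))))] else r)
    ([] : List (String × List (List (String × String))))
  let leftovers := grouped.items.filter (fun kv => !CATEGORY_PRECEDENCE.contains kv.1)
  result ++ PySem.List.sorted leftovers (fun kv => -(kv.2.length : Int))

-- ===== PRECONDITION & SPEC =====
def Spec_group_conditions_by_category (conditions : List (List (String × String))) (out : List (String × List (List (String × String)))) : Prop := out = group_conditions_by_category_alt conditions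
instance (conditions : List (List (String × String))) (out : List (String × List (List (String × String)))) : Decidable (Spec_group_conditions_by_category conditions out) := by unfold Spec_group_conditions_by_category; infer_instance

-- ===== CLAIM (what is proved, stated in full; the proofs are below) =====
def Claim_equal_group_conditions_by_category : Prop := ∀ (conditions : List (List (String × String))), Dom_group_conditions_by_category conditions → Spec_group_conditions_by_category conditions (group_conditions_by_category conditions)

-- ===== LEMMAS AND PROOFS =====

def pvKname (n : String) : Int :=
  if CATEGORY_PRECEDENCE.contains n then (((PySem.List.index? CATEGORY_PRECEDENCE n).getD 0 : Nat) : Int) else 999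

theorem pv_insertBy_append_of_all_before {α : Type} (b : α → α → Bool) (x : α) (K U : List α)
    (h : ∀ u ∈ U, b x u = true) :
    PySem.List.insertBy b x (K ++ U) = PySem.List.insertBy b x K ++ U := by
  induction K with
  | nil =>
    cases U with
    | nil => rfl
    | cons u U' => simp [PySem.List.insertBy, h u (by simp)]
  | cons y K' ih =>
    simp only [List.cons_append, PySem.List.insertBy]
    split <;> simp [ih]

theorem pv_insertBy_append_of_all_not_before {α : Type} (b : α → α → Bool) (x : α) (K U : List α)
    (h : ∀ y ∈ K, b x y = false) :
    PySem.List.insertBy b x (K ++ U) = K ++ PySem.List.insertBy b x U := by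
  induction K with
  | nil => rfl
  | cons y K' ih =>
    simp only [List.cons_append, PySem.List.insertBy, h y (by simp)]
    simp only [Bool.false_eq_true, if_false]
    rw [ih (fun z hz => h z (by simp [hz]))]

theorem pv_insertBy_congr {α : Type} (b b' : α → α → Bool) (x : α) (l : List α)
    (h : ∀ y ∈ l, b x y = b' x y) :
    PySem.List.insertBy b x l = PySem.List.insertBy b' x l := by
  induction l with
  | nil => rfl
  | cons y l' ih =>
    simp only [PySem.List.insertBy, h y (by simp)]
    split <;> simp_all

theorem pv_kname_lt (s : String) (h : CATEGORY_PRECEDENCE.contains s = true) : pvKname s < 999 := by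
  unfold pvKname
  rw [if_pos h]
  have hm : s ∈ CATEGORY_PRECEDENCE := by simpa using h
  obtain ⟨k, hk⟩ := Option.isSome_iff_exists.mp ((PySem.List.index?_isSome_iff _ _).mpr hm)
  obtain ⟨hlen, -, -⟩ := PySem.List.getElem_of_index?_eq_some hk
  rw [hk]
  simp only [Option.getD_some]
  have : k < 16 := by simpa [CATEGORY_PRECEDENCE] using hlen
  omega

theorem pv_kname_inj (s t : String) (hs : CATEGORY_PRECEDENCE.contains s = true)
    (ht : CATEGORY_PRECEDENCE.contains t = true) (h : pvKname s = pvKname t) : s = t := by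
  have hms : s ∈ CATEGORY_PRECEDENCE := by simpa using hs
  have hmt : t ∈ CATEGORY_PRECEDENCE := by simpa using ht
  obtain ⟨k, hk⟩ := Option.isSome_iff_exists.mp ((PySem.List.index?_isSome_iff _ _).mpr hms)
  obtain ⟨j, hj⟩ := Option.isSome_iff_exists.mp ((PySem.List.index?_isSome_iff _ _).mpr hmt)
  unfold pvKname at h
  rw [if_pos hs, if_pos ht, hk, hj] at h
  simp only [Option.getD_some, Nat.cast_inj] at h
  obtain ⟨hks, hgs, -⟩ := PySem.List.getElem_of_index?_eq_some hk
  obtain ⟨hjt, hgt, -⟩ := PySem.List.getElem_of_index?_eq_some hj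
  subst h
  rw [← hgs, ← hgt]

theorem pv_cp_pairwise : CATEGORY_PRECEDENCE.Pairwise (fun n m => pvKname n < pvKname m) := by decide

theorem pv_cp_nodup : CATEGORY_PRECEDENCE.Nodup := by decide

theorem pv_foldl_insertBy_partition {α : Type} (p : α → Bool) (b b2 : α → α → Bool)
    (hKU : ∀ x y, p x = true → p y = false → b x y = true)
    (hUK : ∀ x y, p x = false → p y = true → b x y = false)
    (hUU : ∀ x y, p x = false → p y = false → b x y = b2 x y) :
    ∀ (xs K U : List α), (∀ y ∈ K, p y = true) → (∀ y ∈ U, p y = false) →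
    xs.foldl (fun acc x => PySem.List.insertBy b x acc) (K ++ U)
      = (xs.filter p).foldl (fun acc x => PySem.List.insertBy b x acc) K
        ++ (xs.filter (fun x => !p x)).foldl (fun acc x => PySem.List.insertBy b2 x acc) U := by
  intro xs
  induction xs with
  | nil => intro K U _ _; rfl
  | cons x xs ih =>
    intro K U hK hU
    simp only [List.foldl_cons, List.filter_cons]
    cases hp : p x with
    | true =>
      have h1 : PySem.List.insertBy b x (K ++ U) = PySem.List.insertBy b x K ++ U :=
        pv_insertBy_append_of_all_before b x K U (fun u hu => hKU x u hp (hU u hu))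
      rw [h1]
      simp only [Bool.not_true, if_pos, List.foldl_cons]
      exact ih (PySem.List.insertBy b x K) U
        (fun y hy => by rcases (PySem.List.mem_insertBy b x y K).mp hy with rfl | hy'
                        · exact hp
                        · exact hK y hy') hU
    | false =>
      have h1 : PySem.List.insertBy b x (K ++ U) = K ++ PySem.List.insertBy b x U :=
        pv_insertBy_append_of_all_not_before b x K U (fun y hy => hUK x y hp (hK y hy))
      have h2 : PySem.List.insertBy b x U = PySem.List.insertBy b2 x U :=
        pv_insertBy_congr b b2 x U (fun u hu => hUU x u hp (hU u hu))
      rw [h1, h2]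
      simp only [Bool.not_false, if_pos, Bool.false_eq_true, if_false, List.foldl_cons]
      exact ih K (PySem.List.insertBy b2 x U) hK
        (fun y hy => by rcases (PySem.List.mem_insertBy b2 x y U).mp hy with rfl | hy'
                        · exact hp
                        · exact hU y hy')

theorem pv_foldl_insertBy_congr {α : Type} (b b' : α → α → Bool) :
    ∀ (xs acc : List α), (∀ x ∈ xs, ∀ y, (y ∈ acc ∨ y ∈ xs) → b x y = b' x y) →
    xs.foldl (fun acc x => PySem.List.insertBy b x acc) acc
      = xs.foldl (fun acc x => PySem.List.insertBy b' x acc) acc := by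
  intro xs
  induction xs with
  | nil => intro acc _; rfl
  | cons x xs ih =>
    intro acc h
    simp only [List.foldl_cons]
    rw [pv_insertBy_congr b b' x acc (fun y hy => h x (by simp) y (Or.inl hy))]
    exact ih _ (fun z hz y hy => by
      rcases hy with hy | hy
      · rcases (PySem.List.mem_insertBy b' x y acc).mp hy with rfl | hy'
        · exact h z (by simp [hz]) y (Or.inr (by simp))
        · exact h z (by simp [hz]) y (Or.inl hy')
      · exact h z (by simp [hz]) y (Or.inr (by simp [hy])))

theorem pv_grouped_eq (conditions : List (List (String × String))) :
    conditions.foldl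
      (fun g c =>
        let category := pvGetCategory c
        let g := if g.contains category then g else g.insert category ([] : List (List (String × String)))
        g.insert category (g.getD category [] ++ [c]))
      PySem.Dict.empty
    = conditions.foldl
      (fun g c => g.modify (pvGetCategory c) ([] : List (List (String × String))) (fun old => old ++ [c]))
      PySem.Dict.empty := by
  have hbody : (fun (g : PySem.Dict String (List (List (String × String)))) (c : List (String × String)) =>
        let category := pvGetCategory c
        let g := if g.contains category then g else g.insert category ([] : List (List (String × String)))
        g.insert category (g.getD category [] ++ [c]))
      = fun g c => g.modify (pvGetCategory c) ([] : List (List (String × String))) (fun old => old ++ [c]) := by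
    funext g c
    show (let category := pvGetCategory c
          let g' := if g.contains category then g else g.insert category []
          g'.insert category (g'.getD category [] ++ [c]))
        = g.modify (pvGetCategory c) [] (fun old => old ++ [c])
    simp only [PySem.Dict.modify]
    cases h : g.contains (pvGetCategory c) with
    | true => simp
    | false =>
      simp only [Bool.false_eq_true, if_false]
      rw [PySem.Dict.getD_insert_self, PySem.Dict.insert_insert_self,
          PySem.Dict.getD_of_not_contains g _ h]
  rw [hbody]

theorem pv_mem_items_eq_of_fst_eq {ν : Type} (d : PySem.Dict String ν) (hnd : d.keys.Nodup)
    (x y : String × ν) (hx : x ∈ d.items) (hy : y ∈ d.items) (h : x.1 = y.1) : x = y := by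
  obtain ⟨k, v⟩ := x
  obtain ⟨k', v'⟩ := y
  simp only at h
  subst h
  have h1 := PySem.Dict.get?_of_mem_items d hx hnd
  have h2 := PySem.Dict.get?_of_mem_items d hy hnd
  rw [h1] at h2
  injection h2 with h2
  rw [h2]

theorem pv_main (G : PySem.Dict String (List (List (String × String)))) (hG : G.keys.Nodup) :
    PySem.List.sorted2 G.items
      (fun x => if CATEGORY_PRECEDENCE.contains x.1 then (((PySem.List.index? CATEGORY_PRECEDENCE x.1).getD 0 : Nat) : Int) else 999)
      (fun x => -(x.2.length : Int))
    = CATEGORY_PRECEDENCE.foldl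
        (fun r n => if G.contains n then r ++ [(n, G.getD n ([] : List (List (String × String))))] else r)
        ([] : List (String × List (List (String × String))))
      ++ PySem.List.sorted (G.items.filter (fun kv => !CATEGORY_PRECEDENCE.contains kv.1))
          (fun kv => -(kv.2.length : Int)) := by
  have hitems : G.items.Nodup := by
    have := hG
    simp only [PySem.Dict.keys] at this
    exact this.of_map
  -- abbreviations
  let p : String × List (List (String × String)) → Bool := fun x => CATEGORY_PRECEDENCE.contains x.1
  let b : (String × List (List (String × String))) → (String × List (List (String × String))) → Bool :=
    fun a c => decide (pvKname a.1 < pvKname c.1)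
      || (!decide (pvKname c.1 < pvKname a.1) && decide (-(a.2.length : Int) < -(c.2.length : Int)))
  let b2 : (String × List (List (String × String))) → (String × List (List (String × String))) → Bool :=
    fun a c => decide ((fun kv : String × List (List (String × String)) => -(kv.2.length : Int)) a
      < (fun kv : String × List (List (String × String)) => -(kv.2.length : Int)) c)
  let b1 : (String × List (List (String × String))) → (String × List (List (String × String))) → Bool :=
    fun a c => decide ((fun x : String × List (List (String × String)) => pvKname x.1) a
      < (fun x : String × List (List (String × String)) => pvKname x.1) c)
  have hKname999 : ∀ s, CATEGORY_PRECEDENCE.contains s = false → pvKname s = 999 := by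
    intro s h; unfold pvKname; rw [h]; simp
  have hsplit := pv_foldl_insertBy_partition p b b2
    (by intro x y hx hy
        have h1 := pv_kname_lt x.1 hx
        have h2 := hKname999 y.1 hy
        simp only [b]
        rw [h2]
        simp [h1])
    (by intro x y hx hy
        have h1 := pv_kname_lt y.1 hy
        have h2 := hKname999 x.1 hx
        simp only [b]
        rw [h2]
        have : ¬ ((999 : Int) < pvKname y.1) := by omega
        have h3 : pvKname y.1 < (999 : Int) := h1
        simp [this, h3])
    (by intro x y hx hy
        simp only [b, b2, hKname999 x.1 hx, hKname999 y.1 hy]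
        simp)
    G.items [] [] (by simp) (by simp)
  simp only [List.nil_append] at hsplit
  have hs2 : PySem.List.sorted2 G.items
      (fun x => if CATEGORY_PRECEDENCE.contains x.1 then (((PySem.List.index? CATEGORY_PRECEDENCE x.1).getD 0 : Nat) : Int) else 999)
      (fun x => -(x.2.length : Int))
      = G.items.foldl (fun acc x => PySem.List.insertBy b x acc) [] := rfl
  rw [hs2, hsplit]
  -- unknown part
  have hunk : (G.items.filter (fun x => !p x)).foldl (fun acc x => PySem.List.insertBy b2 x acc) []
      = PySem.List.sorted (G.items.filter (fun kv => !CATEGORY_PRECEDENCE.contains kv.1))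
          (fun kv => -(kv.2.length : Int)) := by
    rw [PySem.List.sorted_eq_foldl_insertBy]
  -- known part
  have hcongr : (G.items.filter p).foldl (fun acc x => PySem.List.insertBy b x acc) []
      = (G.items.filter p).foldl (fun acc x => PySem.List.insertBy b1 x acc) [] := by
    apply pv_foldl_insertBy_congr
    intro x hx y hy
    rcases hy with hy | hy
    · simp at hy
    · have hxm := List.mem_filter.mp hx
      have hym := List.mem_filter.mp hy
      by_cases hfst : x.1 = y.1
      · have := pv_mem_items_eq_of_fst_eq G hG x y hxm.1 hym.1 hfst
        subst this
        simp [b, b1]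
      · have hne : pvKname x.1 ≠ pvKname y.1 := fun hc => hfst (pv_kname_inj _ _ hxm.2 hym.2 hc)
        rcases lt_trichotomy (pvKname x.1) (pvKname y.1) with h | h | h
        · simp [b, b1, h]
        · exact absurd h hne
        · have h1 : ¬ pvKname x.1 < pvKname y.1 := by omega
          simp [b, b1, h, h1]
  have hknown : (G.items.filter p).foldl (fun acc x => PySem.List.insertBy b1 x acc) []
      = (CATEGORY_PRECEDENCE.filter (fun n => G.contains n)).map
          (fun n => (n, G.getD n ([] : List (List (String × String))))) := by
    rw [← PySem.List.sorted_eq_foldl_insertBy]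
    apply PySem.List.sorted_eq_of_perm_of_pairwise_lt
    · -- Perm
      apply (List.perm_ext_iff_of_nodup ?_ ?_).mpr
      · intro z
        constructor
        · intro hz
          obtain ⟨n, hn, rfl⟩ := List.mem_map.mp hz
          have hn' := List.mem_filter.mp hn
          have hq : G.contains n = true := hn'.2
          rw [PySem.Dict.contains_eq_isSome_get?] at hq
          obtain ⟨v, hv⟩ := Option.isSome_iff_exists.mp hq
          have hgd : G.getD n [] = v := PySem.Dict.getD_of_get?_eq_some G _ hv
          apply List.mem_filter.mpr
          constructor
          · rw [hgd]; exact PySem.Dict.mem_items_of_get?_eq_some G hv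
          · show p _ = true
            simp only [p, List.contains_eq_mem]
            simpa using hn'.1
        · intro hz
          have hz' := List.mem_filter.mp hz
          obtain ⟨n, v⟩ := z
          have hget : G.get? n = some v := PySem.Dict.get?_of_mem_items G hz'.1 hG
          apply List.mem_map.mpr
          refine ⟨n, List.mem_filter.mpr ⟨by have h2 := hz'.2; simp only [p, List.contains_eq_mem] at h2; simpa using h2, ?_⟩, ?_⟩
          · rw [PySem.Dict.contains_eq_isSome_get?, hget]; rfl
          · rw [PySem.Dict.getD_of_get?_eq_some G _ hget]
      · exact ((pv_cp_nodup.filter _).map (fun n m h => congrArg Prod.fst h))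
      · exact (List.Nodup.filter _ hitems)
    · -- Pairwise
      rw [List.pairwise_map]
      exact (pv_cp_pairwise.filter _).imp (fun h => h)
  rw [hunk, hcongr, hknown, PySem.List.foldl_append_if, List.nil_append]


-- ===== VERDICT (by name: the statement is the Claim_ definition above) =====
theorem group_conditions_by_category_spec : Claim_equal_group_conditions_by_category := by
  intro conditions _
  show group_conditions_by_category conditions = group_conditions_by_category_alt conditions
  have hA : group_conditions_by_category conditions
      = PySem.List.sorted2 ((conditions.foldl
          (fun g c =>
            let category := pvGetCategory c
            let g := if g.contains category then g else g.insert category ([] : List (List (String × String)))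
            g.insert category (g.getD category [] ++ [c]))
          PySem.Dict.empty).items)
        (fun x => if CATEGORY_PRECEDENCE.contains x.1 then (((PySem.List.index? CATEGORY_PRECEDENCE x.1).getD 0 : Nat) : Int) else 999)
        (fun x => -(x.2.length : Int)) := rfl
  have hB : group_conditions_by_category_alt conditions
      = CATEGORY_PRECEDENCE.foldl
          (fun r n => if (conditions.foldl
              (fun g c => g.modify (pvGetCategory c) ([] : List (List (String × String))) (fun old => old ++ [c]))
              PySem.Dict.empty).contains n
            then r ++ [(n, (conditions.foldl
              (fun g c => g.modify (pvGetCategory c) ([] : List (List (String × String))) (fun old => old ++ [c]))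
              PySem.Dict.empty).getD n ([] : List (List (String × String))))] else r)
          ([] : List (String × List (List (String × String))))
        ++ PySem.List.sorted ((conditions.foldl
            (fun g c => g.modify (pvGetCategory c) ([] : List (List (String × String))) (fun old => old ++ [c]))
            PySem.Dict.empty).items.filter (fun kv => !CATEGORY_PRECEDENCE.contains kv.1))
          (fun kv => -(kv.2.length : Int)) := rfl
  rw [hA, hB, pv_grouped_eq conditions]
  exact pv_main _ (PySem.Dict.nodup_keys_foldl_modify_key conditions pvGetCategory
    ([] : List (List (String × String))) (fun _ x => fun old => old ++ [x]) PySem.Dict.empty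
    PySem.Dict.nodup_keys_empty)
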